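-- pv_equiv track=rewrite | github.com/jguida941/voiceterm | dev/scripts/devctl/review_channel/reviewer_state_support.py | _split_markdown_items
-- ===== SOURCE A (Python) =====
-- def _split_markdown_items(text: str) -> list[str]:
--     """Split a markdown list body into top-level bullet blocks."""
--     lines = text.splitlines()
--     if not any(line.lstrip().startswith("- ") for line in lines):
--         return [text.strip()] if text.strip() else []
--     items: list[list[str]] = []
--     current: list[str] = []
--     for line in lines:
--         if line.lstrip().startswith("- "):
--             if current:
--                 items.append(current)
--             current = [line]
--             continue
--         if current:
--             current.append(line)
--     if current:
--         items.append(current)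
--     return ["\n".join(block).strip() for block in items if "\n".join(block).strip()]
-- ===== SOURCE B (Python) =====
-- def _split_markdown_items(text: str) -> list[str]:
--     """Split a markdown list body into top-level bullet blocks."""
--     lines = text.splitlines()
--
--     def is_item(line: str) -> bool:
--         return line.lstrip().startswith("- ")
--
--     k = 0
--     while k < len(lines) and not is_item(lines[k]):
--         k += 1
--     if k == len(lines):
--         stripped = text.strip()
--         return [stripped] if stripped else []
--     out: list[str] = []
--     while k < len(lines):
--         j = k + 1
--         while j < len(lines) and not is_item(lines[j]):
--             j += 1
--         block = "\n".join(lines[k:j]).strip()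
--         if block:
--             out.append(block)
--         k = j
--     return out
-- ===== Notes on version B (the rewrite author's own statement) =====
-- stated objective: alternative
-- what changed: Replaces A's single accumulator state machine (items/current lists with branch flags) by a skip-the-prefix scan to the first bullet followed by repeated span scans that slice each bullet block directly out of the line list.
import Mathlib
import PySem

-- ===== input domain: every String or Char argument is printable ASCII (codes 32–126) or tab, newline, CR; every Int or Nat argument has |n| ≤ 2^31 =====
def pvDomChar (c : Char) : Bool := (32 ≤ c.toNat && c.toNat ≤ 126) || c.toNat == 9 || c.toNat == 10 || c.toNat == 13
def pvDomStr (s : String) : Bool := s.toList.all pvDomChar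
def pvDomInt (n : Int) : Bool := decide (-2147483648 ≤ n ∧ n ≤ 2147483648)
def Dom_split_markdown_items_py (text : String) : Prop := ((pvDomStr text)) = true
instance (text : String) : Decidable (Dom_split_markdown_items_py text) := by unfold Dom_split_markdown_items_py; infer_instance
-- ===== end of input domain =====

-- B is an alternative decomposition: skip the prefix before the first bullet, then slice each
-- block out with a span scan, instead of A's items/current accumulator state machine.

-- ===== PORT A =====
-- line.lstrip().startswith("- ") (used verbatim by both Pythons)
def pvIsItem (line : List Char) : Bool :=
  PySem.Chars.startswith (PySem.Chars.lstrip line) ['-', ' ']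

-- the body of A's for-loop: state = (items, current)
def pvStepA (st : List (List (List Char)) × List (List Char)) (line : List Char) :
    List (List (List Char)) × List (List Char) :=
  if pvIsItem line then
    (if st.2 ≠ [] then st.1 ++ [st.2] else st.1, [line])
  else if st.2 ≠ [] then (st.1, st.2 ++ [line]) else st

def split_markdown_items_py (text : String) : List String :=
  let lines := PySem.Chars.splitlines text.toList
  if ¬ lines.any pvIsItem then
    let t := PySem.Chars.strip text.toList
    if t = [] then [] else [String.ofList t]
  else
    let st := lines.foldl pvStepA ([], [])
    let items := if st.2 ≠ [] then st.1 ++ [st.2] else st.1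
    -- ["\n".join(block).strip() for block in items if "\n".join(block).strip()]
    items.filterMap (fun block =>
      let s := PySem.Chars.strip (PySem.Chars.join ['\n'] block)
      if s = [] then none else some (String.ofList s))

-- ===== PORT B =====
-- the outer while-loop of Source B: head of ls is a bullet line; span = the inner j-scan
def pvBlocksB : List (List Char) → List (List (List Char))
  | [] => []
  | l :: rest =>
    let p := rest.span (fun x => !pvIsItem x)
    (l :: p.1) :: pvBlocksB p.2
termination_by ls => ls.length
decreasing_by
  simp only [List.span_eq_takeWhile_dropWhile]
  exact Nat.lt_succ_of_le (List.length_dropWhile_le _ _)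

def split_markdown_items_py_alt (text : String) : List String :=
  let lines := PySem.Chars.splitlines text.toList
  let rest := lines.dropWhile (fun l => !pvIsItem l)   -- the k-scan to the first bullet
  if rest = [] then
    let t := PySem.Chars.strip text.toList
    if t = [] then [] else [String.ofList t]
  else
    (pvBlocksB rest).foldl (fun acc b =>
      let s := PySem.Chars.strip (PySem.Chars.join ['\n'] b)
      if s = [] then acc else acc ++ [String.ofList s]) []

-- ===== PRECONDITION & SPEC =====
def Spec_split_markdown_items_py (text : String) (out : List String) : Prop := out = split_markdown_items_py_alt text
instance (text : String) (out : List String) : Decidable (Spec_split_markdown_items_py text out) := by unfold Spec_split_markdown_items_py; infer_instance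

-- ===== CLAIM (what is proved, stated in full; the proofs are below) =====
def Claim_equal_split_markdown_items_py : Prop := ∀ (text : String), Dom_split_markdown_items_py text → Spec_split_markdown_items_py text (split_markdown_items_py text)

-- ===== LEMMAS AND PROOFS =====

-- the block list A's loop builds, as a recursion (proof-only helper)
def pvBF (cur : List (List Char)) : List (List Char) → List (List (List Char))
  | [] => [cur]
  | l :: ls => if pvIsItem l then cur :: pvBF [l] ls else pvBF (cur ++ [l]) ls

theorem pvStepA_skip (lines : List (List Char)) (items : List (List (List Char))) :
    lines.foldl pvStepA (items, []) =
      (lines.dropWhile (fun l => !pvIsItem l)).foldl pvStepA (items, []) := by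
  induction lines with
  | nil => rfl
  | cons l ls ih =>
    by_cases h : pvIsItem l
    · simp [h]
    · simp [h, List.foldl_cons, pvStepA, ← ih]

theorem pvA_loop (lines : List (List Char)) :
    ∀ (items : List (List (List Char))) (cur : List (List Char)), cur ≠ [] →
      (if (lines.foldl pvStepA (items, cur)).2 ≠ [] then
          (lines.foldl pvStepA (items, cur)).1 ++ [(lines.foldl pvStepA (items, cur)).2]
        else (lines.foldl pvStepA (items, cur)).1) = items ++ pvBF cur lines := by
  induction lines with
  | nil => intro items cur hc; simp [pvBF, hc]
  | cons l ls ih =>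
    intro items cur hc
    by_cases h : pvIsItem l
    · simp only [List.foldl_cons, pvStepA, h, if_pos, hc, ne_eq, not_false_iff, pvBF]
      rw [ih (items ++ [cur]) [l] (by simp)]
      simp
    · simp only [List.foldl_cons, pvStepA, h, Bool.false_eq_true, if_false, hc, ne_eq,
        not_false_iff, pvBF]
      exact ih items (cur ++ [l]) (by simp)

theorem pvBF_eq_blocks (ls : List (List Char)) :
    ∀ cur, pvBF cur ls =
      (cur ++ ls.takeWhile (fun x => !pvIsItem x)) ::
        pvBlocksB (ls.dropWhile (fun x => !pvIsItem x)) := by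
  induction ls with
  | nil => intro cur; simp [pvBF, pvBlocksB]
  | cons l ls ih =>
    intro cur
    by_cases h : pvIsItem l
    · simp only [pvBF, h, if_true, List.takeWhile_cons, List.dropWhile_cons,
        Bool.not_true, Bool.false_eq_true, if_false, List.append_nil]
      rw [ih [l]]
      simp [pvBlocksB, List.span_eq_takeWhile_dropWhile]
    · simp only [pvBF, h, Bool.false_eq_true, if_false, List.takeWhile_cons, List.dropWhile_cons,
        Bool.not_false, if_true]
      rw [ih (cur ++ [l])]
      simp

theorem pvFoldB_eq_filterMap (bs : List (List (List Char))) :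
    ∀ acc : List String,
      bs.foldl (fun acc b =>
        let s := PySem.Chars.strip (PySem.Chars.join ['\n'] b)
        if s = [] then acc else acc ++ [String.ofList s]) acc =
      acc ++ bs.filterMap (fun block =>
        let s := PySem.Chars.strip (PySem.Chars.join ['\n'] block)
        if s = [] then none else some (String.ofList s)) := by
  induction bs with
  | nil => intro acc; simp
  | cons b bs ih =>
    intro acc
    by_cases h : PySem.Chars.strip (PySem.Chars.join ['\n'] b) = [] <;>
      simp [List.foldl_cons, h, ih]

-- ===== VERDICT (by name: the statement is the Claim_ definition above) =====
theorem split_markdown_items_py_spec : Claim_equal_split_markdown_items_py := by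
  intro text _
  unfold Spec_split_markdown_items_py split_markdown_items_py split_markdown_items_py_alt
  set lines := PySem.Chars.splitlines text.toList with hl
  by_cases hb : lines.any pvIsItem
  · have hrest : lines.dropWhile (fun l => !pvIsItem l) ≠ [] := by
      simp only [ne_eq, List.dropWhile_eq_nil_iff, Bool.not_eq_true', not_forall]
      obtain ⟨x, hx, hx2⟩ := List.any_eq_true.mp hb
      exact ⟨x, hx, by simp [hx2]⟩
    simp only [hb, not_true, if_false, hrest]
    obtain ⟨l, rest, hlr⟩ := List.exists_cons_of_ne_nil hrest
    have hhead : pvIsItem l := by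
      have h2 := List.head_dropWhile_not (fun l => !pvIsItem l) hrest
      simp only [hlr, List.head_cons] at h2
      simpa using h2
    rw [pvStepA_skip lines [], hlr, List.foldl_cons]
    have : pvStepA ([], []) l = ([], [l]) := by simp [pvStepA, hhead]
    rw [this, pvA_loop rest [] [l] (by simp), pvBF_eq_blocks]
    rw [pvFoldB_eq_filterMap]
    simp [pvBlocksB, List.span_eq_takeWhile_dropWhile]
  · have hrest : lines.dropWhile (fun l => !pvIsItem l) = [] := by
      rw [List.dropWhile_eq_nil_iff]
      intro x hx
      simp only [Bool.not_eq_true']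
      exact Bool.eq_false_iff.mpr (fun h => hb (List.any_eq_true.mpr ⟨x, hx, h⟩))
    simp [hb, hrest]
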